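-- pv_equiv track=rewrite | github.com/wilsonzlin/aero | tools/disk-streaming-conformance/conformance.py | _has_comma_outside_quotes
-- ===== SOURCE A (Python) =====
-- def _has_comma_outside_quotes(value: str) -> bool:
--     in_quotes = False
--     escaped = False
--     for ch in value:
--         if escaped:
--             escaped = False
--             continue
--         # Quoted-string can escape characters. Track escapes only while inside quotes so
--         # backslashes in unquoted portions don't affect parsing.
--         if in_quotes and ch == "\\":
--             escaped = True
--             continue
--         if ch == '"':
--             in_quotes = not in_quotes
--             continue
--         if ch == "," and not in_quotes:
--             return True
--     # Be conservative: if quotes are unbalanced, treat it as potentially a list.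
--     return in_quotes
-- ===== SOURCE B (Python) =====
-- def _has_comma_outside_quotes(value: str) -> bool:
--     i, n = 0, len(value)
--     while i < n:
--         ch = value[i]
--         if ch == ',':
--             return True
--         if ch == '"':
--             i += 1
--             closed = False
--             while i < n:
--                 if value[i] == '\\':
--                     i += 2
--                 elif value[i] == '"':
--                     closed = True
--                     break
--                 else:
--                     i += 1
--             if not closed:
--                 return True
--         i += 1
--     return False
-- ===== Notes on version B (the rewrite author's own statement) =====
-- stated objective: alternative
-- what changed: Replaced the boolean in_quotes/escaped state machine over all characters by an index-based outer loop that, on a double-quote, runs an inner loop consuming the whole quoted region (skipping two positions on a backslash) and returns True immediately if the region is unterminated.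
import Mathlib
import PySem

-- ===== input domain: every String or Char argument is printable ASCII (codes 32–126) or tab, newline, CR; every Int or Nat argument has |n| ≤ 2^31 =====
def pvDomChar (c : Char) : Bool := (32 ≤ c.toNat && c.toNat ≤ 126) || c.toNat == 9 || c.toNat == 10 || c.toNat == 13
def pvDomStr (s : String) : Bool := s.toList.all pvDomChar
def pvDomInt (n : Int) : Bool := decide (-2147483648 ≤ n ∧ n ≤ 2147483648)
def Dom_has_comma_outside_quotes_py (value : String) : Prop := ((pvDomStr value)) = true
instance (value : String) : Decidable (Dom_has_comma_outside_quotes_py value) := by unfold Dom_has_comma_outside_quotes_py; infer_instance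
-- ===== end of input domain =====

-- B replaces A's boolean in_quotes/escaped state machine by an index-based outer loop with an inner loop that consumes each quoted region (alternative decomposition, same cost).


-- ===== PORT A =====
-- state machine: (in_quotes, escaped) carried through the characters; early return on comma outside quotes
def goA_hcoq : List Char → Bool → Bool → Bool
  | [], inq, _ => inq
  | c :: t, inq, esc =>
    if esc then goA_hcoq t inq false
    else if inq && c == '\\' then goA_hcoq t inq true
    else if c == '"' then goA_hcoq t (!inq) false
    else if c == ',' && !inq then true
    else goA_hcoq t inq false

def has_comma_outside_quotes_py (value : String) : Bool :=
  goA_hcoq value.toList false false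

-- ===== PORT B =====
-- inner while loop of B: consume a quoted region; `some r` = rest after the closing quote,
-- `none` = the loop ran past the end (unterminated region / trailing escape)
def scanQuoted_hcoq : List Char → Option (List Char)
  | [] => none
  | c :: t =>
    if c == '\\' then
      match t with
      | [] => none            -- i += 2 jumps past the end
      | _ :: t' => scanQuoted_hcoq t'
    else if c == '"' then some t
    else scanQuoted_hcoq t

theorem scanQuoted_hcoq_length : ∀ (n : ℕ) (l r : List Char), l.length ≤ n →
    scanQuoted_hcoq l = some r → r.length ≤ l.length := by
  intro n
  induction n with
  | zero =>
    intro l r hl h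
    have : l = [] := List.eq_nil_of_length_eq_zero (Nat.le_zero.mp hl)
    subst this; simp [scanQuoted_hcoq] at h
  | succ n ih =>
    intro l r hl h
    match l with
    | [] => simp [scanQuoted_hcoq] at h
    | c :: t =>
      simp at hl
      by_cases hbs : c == '\\'
      · match t with
        | [] =>
          rw [scanQuoted_hcoq.eq_def] at h
          simp [hbs] at h
        | d :: t' =>
          rw [scanQuoted_hcoq.eq_def] at h
          simp [hbs] at h
          have := ih t' r (by simp at hl ⊢; omega) h
          simp; omega
      · by_cases hq : c == '"'
        · rw [scanQuoted_hcoq.eq_def] at h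
          simp [hbs, hq] at h
          simp [← h]
        · rw [scanQuoted_hcoq.eq_def] at h
          simp [hbs, hq] at h
          have := ih t r (by omega) h
          simp; omega

-- outer while loop of B
def goB_hcoq : List Char → Bool
  | [] => false
  | c :: t =>
    if c == ',' then true
    else if c == '"' then
      match h : scanQuoted_hcoq t with
      | none => true
      | some r => goB_hcoq r
    else goB_hcoq t
termination_by l => l.length
decreasing_by
  · have := scanQuoted_hcoq_length t.length t r (le_refl _) h; simp; omega
  · simp

def has_comma_outside_quotes_py_alt (value : String) : Bool :=
  goB_hcoq value.toList

-- ===== PRECONDITION & SPEC =====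
def Spec_has_comma_outside_quotes_py (value : String) (out : Bool) : Prop := out = has_comma_outside_quotes_py_alt value
instance (value : String) (out : Bool) : Decidable (Spec_has_comma_outside_quotes_py value out) := by unfold Spec_has_comma_outside_quotes_py; infer_instance

-- ===== CLAIM (what is proved, stated in full; the proofs are below) =====
def Claim_equal_has_comma_outside_quotes_py : Prop := ∀ (value : String), Dom_has_comma_outside_quotes_py value → Spec_has_comma_outside_quotes_py value (has_comma_outside_quotes_py value)

-- ===== LEMMAS AND PROOFS =====

-- inside quotes, A's state machine agrees with B's "consume quoted region" helper
theorem goA_inq_eq_scan : ∀ (n : ℕ) (l : List Char), l.length ≤ n →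
    goA_hcoq l true false = (match scanQuoted_hcoq l with | none => true | some r => goA_hcoq r false false) := by
  intro n
  induction n with
  | zero =>
    intro l hl
    have : l = [] := List.eq_nil_of_length_eq_zero (Nat.le_zero.mp hl)
    subst this; simp [goA_hcoq, scanQuoted_hcoq]
  | succ n ih =>
    intro l hl
    match l with
    | [] => simp [goA_hcoq, scanQuoted_hcoq]
    | c :: t =>
      simp at hl
      by_cases hbs : c == '\\'
      · simp [goA_hcoq, hbs]
        match t with
        | [] => simp [goA_hcoq, scanQuoted_hcoq, hbs]
        | d :: t' =>
          have h' : t'.length ≤ n := by simp at hl ⊢; omega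
          simp [goA_hcoq, scanQuoted_hcoq, hbs]
          exact ih t' h'
      · by_cases hq : c == '"'
        · have hsq : scanQuoted_hcoq (c :: t) = some t := by
            conv_lhs => rw [scanQuoted_hcoq.eq_def]
            simp [hbs, hq]
          simp [goA_hcoq, hbs, hq, hsq]
        · have hs : scanQuoted_hcoq (c :: t) = scanQuoted_hcoq t := by
            conv_lhs => rw [scanQuoted_hcoq.eq_def]
            simp [hbs, hq]
          simp [goA_hcoq, hbs, hq, hs]
          exact ih t (by omega)

-- the outer loops agree
theorem goB_eq_goA : ∀ (n : ℕ) (l : List Char), l.length ≤ n →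
    goB_hcoq l = goA_hcoq l false false := by
  intro n
  induction n with
  | zero =>
    intro l hl
    have : l = [] := List.eq_nil_of_length_eq_zero (Nat.le_zero.mp hl)
    subst this; simp [goA_hcoq, goB_hcoq]
  | succ n ih =>
    intro l hl
    match l with
    | [] => simp [goA_hcoq, goB_hcoq]
    | c :: t =>
      simp at hl
      by_cases hc : c == ','
      · have hc' : c = ',' := by simpa using hc
        subst hc'
        simp [goA_hcoq, goB_hcoq]
      · by_cases hq : c == '"'
        · have h1 := goA_inq_eq_scan t.length t (le_refl _)
          simp [goA_hcoq, goB_hcoq, hq, hc, h1]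
          match h : scanQuoted_hcoq t with
          | none => simp
          | some r =>
            have := scanQuoted_hcoq_length t.length t r (le_refl _) h
            simp
            exact ih r (by omega)
        · simp [goA_hcoq, goB_hcoq, hq, hc]
          exact ih t (by omega)

-- ===== VERDICT (by name: the statement is the Claim_ definition above) =====
theorem has_comma_outside_quotes_py_spec : Claim_equal_has_comma_outside_quotes_py := by
  intro value _
  unfold Spec_has_comma_outside_quotes_py has_comma_outside_quotes_py has_comma_outside_quotes_py_alt
  exact (goB_eq_goA value.toList.length value.toList (le_refl _)).symm
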